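-- pv_equiv track=rewrite | github.com/northperseids/compass-calc | main.py | expression_split
-- ===== SOURCE A (Python) =====
-- def expression_split(exp, op):
--         result = []
--         brackets = 0
--         currentChunk = ""
--         for char in exp:
--             # if character is open-brackets, start recording the in-brackets chunk (see "else" statement at the end of this block);
--             # otherwise, if the character is close-brackets, stop recording the in-brackets chunk
--             if char == '(':
--                 brackets += 1
--             elif char == ')':
--                 brackets -= 1
--             # if brackets have closed and the next character is the operator, continue the split by sticking the chunk into the result array
--             # and reset the currentChunk to empty string.
--             if brackets == 0 and op == char:
--                 result.append(currentChunk)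
--                 currentChunk = ""
--             # this is the "record what's in the brackets" bit.
--             else:
--                 currentChunk = currentChunk + char
--         # stick chunk into result array if chunk is not empty
--         if currentChunk != "":
--             result.append(currentChunk)
--         return result
-- ===== SOURCE B (Python) =====
-- def expression_split(exp, op):
--     # Two-pass: record indices of top-level operator occurrences, then slice.
--     depth = 0
--     idxs = []
--     for i, ch in enumerate(exp):
--         if ch == '(':
--             depth += 1
--         elif ch == ')':
--             depth -= 1
--         if depth == 0 and ch == op:
--             idxs.append(i)
--     parts = []
--     prev = 0
--     for j in idxs:
--         parts.append(exp[prev:j])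
--         prev = j + 1
--     tail = exp[prev:]
--     if tail:
--         parts.append(tail)
--     return parts
-- ===== Notes on version B (the rewrite author's own statement) =====
-- stated objective: alternative
-- what changed: Replaces A's single-pass incremental chunk accumulation (building each segment char by char) with a two-pass decomposition: one pass collects the indices of top-level operator occurrences, then a second pass constructs the segments by slicing the original string between consecutive indices, dropping only a trailing empty slice.
import Mathlib
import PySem

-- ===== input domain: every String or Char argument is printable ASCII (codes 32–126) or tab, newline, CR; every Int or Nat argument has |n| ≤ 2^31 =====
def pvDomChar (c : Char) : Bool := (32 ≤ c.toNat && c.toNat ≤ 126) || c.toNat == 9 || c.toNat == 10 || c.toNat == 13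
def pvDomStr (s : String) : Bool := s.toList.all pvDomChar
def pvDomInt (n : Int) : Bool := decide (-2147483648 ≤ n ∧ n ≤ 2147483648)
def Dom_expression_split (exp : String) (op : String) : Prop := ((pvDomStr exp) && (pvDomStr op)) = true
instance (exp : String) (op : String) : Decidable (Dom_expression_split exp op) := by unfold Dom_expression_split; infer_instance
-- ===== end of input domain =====

-- B replaces A's incremental chunk accumulation by an index-collection pass plus a slicing pass (alternative decomposition, same cost).

-- ===== PORT A =====
-- one loop step of A: update bracket depth, then either flush the current chunk or extend it
def expStepA (op : String) (st : List (List Char) × Int × List Char) (c : Char) :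
    List (List Char) × Int × List Char :=
  let br := if c = '(' then st.2.1 + 1 else if c = ')' then st.2.1 - 1 else st.2.1
  if br = 0 ∧ String.mk [c] = op then (st.1 ++ [st.2.2], br, [])
  else (st.1, br, st.2.2 ++ [c])

-- A's final "append chunk if not empty"
def finishA (st : List (List Char) × Int × List Char) : List (List Char) :=
  if st.2.2 ≠ [] then st.1 ++ [st.2.2] else st.1

def expression_split (exp : String) (op : String) : List String :=
  (finishA (exp.toList.foldl (expStepA op) ([], 0, []))).map String.mk

-- ===== PORT B =====
-- pass 1: indices of top-level operator occurrences (depth updated before the test, as in Source B)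
def splitIdxs (op : String) : List Char → Int → Nat → List Nat
  | [], _, _ => []
  | c :: t, br, i =>
      let br' := if c = '(' then br + 1 else if c = ')' then br - 1 else br
      if br' = 0 ∧ String.mk [c] = op then i :: splitIdxs op t br' (i + 1)
      else splitIdxs op t br' (i + 1)

-- pass 2: slice between split indices; exp[prev:j] = (drop prev).take (j-prev) is exact here
-- since 0 ≤ prev ≤ j < length; the base case is Source B's trailing `tail` check
def buildParts (chars : List Char) : Nat → List Nat → List (List Char)
  | prev, [] => let tail := chars.drop prev; if tail ≠ [] then [tail] else []
  | prev, j :: js => (chars.drop prev).take (j - prev) :: buildParts chars (j + 1) js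

def expression_split_alt (exp : String) (op : String) : List String :=
  (buildParts exp.toList 0 (splitIdxs op exp.toList 0 0)).map String.mk

-- ===== PRECONDITION & SPEC =====
def Spec_expression_split (exp : String) (op : String) (out : List String) : Prop := out = expression_split_alt exp op
instance (exp : String) (op : String) (out : List String) : Decidable (Spec_expression_split exp op out) := by unfold Spec_expression_split; infer_instance

-- ===== CLAIM (what is proved, stated in full; the proofs are below) =====
def Claim_equal_expression_split : Prop := ∀ (exp : String) (op : String), Dom_expression_split exp op → Spec_expression_split exp op (expression_split exp op)

-- ===== LEMMAS AND PROOFS =====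

-- common reference function: the chunks A will still emit from state (br, cur) over the rest of the input
def hrun (op : String) : List Char → Int → List Char → List (List Char)
  | [], _, cur => if cur ≠ [] then [cur] else []
  | c :: t, br, cur =>
      let br' := if c = '(' then br + 1 else if c = ')' then br - 1 else br
      if br' = 0 ∧ String.mk [c] = op then cur :: hrun op t br' []
      else hrun op t br' (cur ++ [c])

lemma foldA_eq (op : String) (l : List Char) (res : List (List Char)) (br : Int) (cur : List Char) :
    finishA (l.foldl (expStepA op) (res, br, cur)) = res ++ hrun op l br cur := by
  induction l generalizing res br cur with
  | nil => simp [finishA, hrun]; split_ifs <;> simp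
  | cons c t ih =>
      simp only [List.foldl_cons, expStepA, hrun]
      by_cases h : (if c = '(' then br + 1 else if c = ')' then br - 1 else br) = 0 ∧
          String.mk [c] = op
      · rw [if_pos h, if_pos h, ih]; simp
      · rw [if_neg h, if_neg h, ih]

lemma buildParts_eq (op : String) (l : List Char) (br : Int) (pre mid : List Char) :
    buildParts (pre ++ (mid ++ l)) pre.length (splitIdxs op l br (pre.length + mid.length))
      = hrun op l br mid := by
  induction l generalizing br pre mid with
  | nil =>
      simp [splitIdxs, buildParts, hrun]
  | cons c t ih =>
      simp only [splitIdxs, hrun]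
      set br' := if c = '(' then br + 1 else if c = ')' then br - 1 else br
      by_cases h : br' = 0 ∧ String.mk [c] = op
      · rw [if_pos h, if_pos h]
        simp only [buildParts]
        have h2 := ih br' (pre ++ mid ++ [c]) []
        simp only [List.append_assoc, List.singleton_append, List.length_append, List.length_cons,
          List.length_nil, Nat.add_zero, List.nil_append] at h2
        have h1 : ((pre ++ (mid ++ c :: t)).drop pre.length).take
            (pre.length + mid.length - pre.length) = mid := by
          rw [List.drop_left, Nat.add_sub_cancel_left, show mid ++ c :: t = mid ++ (c :: t) from rfl,
            List.take_left]
        rw [h1, Nat.add_assoc pre.length mid.length 1, h2]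
      · rw [if_neg h, if_neg h]
        have h2 := ih br' pre (mid ++ [c])
        simp only [List.append_assoc, List.singleton_append, List.length_append, List.length_cons,
          List.length_nil] at h2
        rw [Nat.add_assoc pre.length mid.length 1, h2]

-- ===== VERDICT (by name: the statement is the Claim_ definition above) =====
theorem expression_split_spec : Claim_equal_expression_split := by
  intro exp op _
  unfold Spec_expression_split expression_split expression_split_alt
  have hB := buildParts_eq op exp.toList 0 [] []
  simp only [List.nil_append, List.length_nil, Nat.add_zero] at hB
  rw [foldA_eq, hB, List.nil_append]
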